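-- pv_equiv track=rewrite | github.com/mcgriffin/space_dates | draft/celestial_events/celestial_events.py | month_generator
-- ===== SOURCE A (Python) =====
-- def month_generator(date_month_day_or_days):
--     month = []
--     for s in date_month_day_or_days:
--         if 'Jan' in date_month_day_or_days:
--             month = '01'
--         elif 'Feb' in date_month_day_or_days:
--             month = '02'
--         elif 'Mar' in date_month_day_or_days:
--             month = '03'
--         elif 'Apr' in date_month_day_or_days:
--             month = '04'
--         elif 'May' in date_month_day_or_days:
--             month = '05'
--         elif 'Jun' in date_month_day_or_days:
--             month = '06'
--         elif 'Jul' in date_month_day_or_days: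
--             month = '07'
--         elif 'Aug' in date_month_day_or_days:
--             month = '08'
--         elif 'Sep' in date_month_day_or_days:
--             month = '09'
--         elif 'Oct' in date_month_day_or_days:
--             month = '10'
--         elif 'Nov' in date_month_day_or_days:
--             month = '11'
--         elif 'Dec' in date_month_day_or_days:
--             month = '12'
--     return month
-- ===== SOURCE B (Python) =====
-- # table scanned in calendar order; first match wins; [] is the module's
-- # no-month sentinel (the original's default), kept as-is
-- MONTHS = [
--     ('Jan', '01'), ('Feb', '02'), ('Mar', '03'), ('Apr', '04'),
--     ('May', '05'), ('Jun', '06'), ('Jul', '07'), ('Aug', '08'),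
--     ('Sep', '09'), ('Oct', '10'), ('Nov', '11'), ('Dec', '12'),
-- ]
--
--
-- def month_generator(date_month_day_or_days):
--     for abbr, num in MONTHS:
--         if abbr in date_month_day_or_days:
--             return num
--     return []
-- ===== Notes on version B (the rewrite author's own statement) =====
-- stated objective: faster
-- what changed: Replaced the per-character loop that re-runs a 12-branch if/elif cascade of whole-string substring tests on every iteration with a single scan over an ordered (abbreviation, number) table returning the first match (same [] default when nothing matches).
-- outside the precondition, e.g. on month_generator('2020-13-05'): A returns [], B returns []; on month_generator(''): A returns [], B returns []
import Mathlib
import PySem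

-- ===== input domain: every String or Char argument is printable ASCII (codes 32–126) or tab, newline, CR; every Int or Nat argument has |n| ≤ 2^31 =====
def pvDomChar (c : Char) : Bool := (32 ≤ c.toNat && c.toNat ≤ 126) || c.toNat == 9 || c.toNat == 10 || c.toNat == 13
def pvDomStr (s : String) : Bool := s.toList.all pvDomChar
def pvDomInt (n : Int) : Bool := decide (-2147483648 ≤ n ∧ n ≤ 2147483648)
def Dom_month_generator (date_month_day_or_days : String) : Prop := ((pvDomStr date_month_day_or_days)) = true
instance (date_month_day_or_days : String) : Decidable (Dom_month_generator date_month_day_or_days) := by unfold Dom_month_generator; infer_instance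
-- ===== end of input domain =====

-- B replaces A's per-character loop re-running a 12-branch if/elif cascade by one scan of an
-- ordered (abbreviation, number) table, returning the first match (measured faster in a timing run).

-- ===== PORT A =====
-- A's loop runs once per character of the string; each iteration re-evaluates the whole
-- cascade on the full string.  The Python initial value is the list [] (not a str); Pre_
-- guarantees a month abbreviation is present, so the initial value is always overwritten —
-- it is rendered here as "" (unreachable under Pre_).
def month_generator (date_month_day_or_days : String) : String :=
  date_month_day_or_days.toList.foldl (fun month _ =>
    if PySem.Str.isIn "Jan" date_month_day_or_days then "01"
    else if PySem.Str.isIn "Feb" date_month_day_or_days then "02"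
    else if PySem.Str.isIn "Mar" date_month_day_or_days then "03"
    else if PySem.Str.isIn "Apr" date_month_day_or_days then "04"
    else if PySem.Str.isIn "May" date_month_day_or_days then "05"
    else if PySem.Str.isIn "Jun" date_month_day_or_days then "06"
    else if PySem.Str.isIn "Jul" date_month_day_or_days then "07"
    else if PySem.Str.isIn "Aug" date_month_day_or_days then "08"
    else if PySem.Str.isIn "Sep" date_month_day_or_days then "09"
    else if PySem.Str.isIn "Oct" date_month_day_or_days then "10"
    else if PySem.Str.isIn "Nov" date_month_day_or_days then "11"
    else if PySem.Str.isIn "Dec" date_month_day_or_days then "12"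
    else month) ""

-- ===== PORT B =====
def monthTable : List (String × String) :=
  [("Jan", "01"), ("Feb", "02"), ("Mar", "03"), ("Apr", "04"),
   ("May", "05"), ("Jun", "06"), ("Jul", "07"), ("Aug", "08"),
   ("Sep", "09"), ("Oct", "10"), ("Nov", "11"), ("Dec", "12")]

-- Source B's loop with early return: scan the table, return the first number whose
-- abbreviation occurs in the string.  Source B's fallthrough value is the sentinel [] (not a
-- str); under Pre_ it is unreachable, rendered here as "".
def findMonth (table : List (String × String)) (s : String) : String :=
  match table with
  | [] => ""
  | (abbr, num) :: rest => if PySem.Str.isIn abbr s then num else findMonth rest s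

def month_generator_alt (date_month_day_or_days : String) : String :=
  findMonth monthTable date_month_day_or_days

-- ===== PRECONDITION & SPEC =====
-- Pre_ excludes the inputs in which no month abbreviation occurs: there both Pythons return
-- the empty LIST [] (the no-month sentinel), which is not a value of the declared str type
-- and so cannot be the ports' return value.
def Pre_month_generator (date_month_day_or_days : String) : Prop :=
  ∃ p ∈ monthTable, PySem.Str.isIn p.1 date_month_day_or_days = true
instance (date_month_day_or_days : String) : Decidable (Pre_month_generator date_month_day_or_days) := by
  unfold Pre_month_generator; infer_instance

def pvWitness_month_generator : String := "5 Dec 2020"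

def Spec_month_generator (date_month_day_or_days : String) (out : String) : Prop := out = month_generator_alt date_month_day_or_days
instance (date_month_day_or_days : String) (out : String) : Decidable (Spec_month_generator date_month_day_or_days out) := by unfold Spec_month_generator; infer_instance

-- ===== CLAIM (what is proved, stated in full; the proofs are below) =====
def Claim_equal_month_generator : Prop := ∀ (date_month_day_or_days : String), Dom_month_generator date_month_day_or_days → Pre_month_generator date_month_day_or_days → Spec_month_generator date_month_day_or_days (month_generator date_month_day_or_days)

-- ===== LEMMAS AND PROOFS =====

-- a foldl whose step ignores the accumulator is its constant, on a nonempty list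
theorem foldl_const_of_ne_nil {α β : Type} (c : β) (b : β) (l : List α) (h : l ≠ []) :
    l.foldl (fun _ _ => c) b = c := by
  induction l generalizing b with
  | nil => exact absurd rfl h
  | cons a t ih =>
    cases t with
    | nil => rfl
    | cons a' t' => exact ih c (by simp)

-- Pre_ says exactly: some row of the table matches
theorem pre_exists (s : String) (h : Pre_month_generator s) :
    ∃ p ∈ monthTable, PySem.Str.isIn p.1 s = true := h

-- under Pre_, a month abbreviation is an infix of s, so s has characters
theorem toList_ne_nil_of_pre (s : String) (h : Pre_month_generator s) : s.toList ≠ [] := by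
  obtain ⟨p, hp, hps⟩ := pre_exists s h
  rw [PySem.Str.isIn_iff_infix] at hps
  have hlen := hps.sublist.length_le
  have h3 : p.1.toList.length = 3 := by fin_cases hp <;> decide
  intro hnil
  rw [hnil] at hlen
  simp [h3] at hlen


-- findMonth with an arbitrary default in the empty case (the shape of A's loop body)
def findMonthD (table : List (String × String)) (s : String) (dflt : String) : String :=
  match table with
  | [] => dflt
  | (abbr, num) :: rest => if PySem.Str.isIn abbr s then num else findMonthD rest s dflt

-- when some row matches, the default is never reached
theorem findMonthD_eq (table : List (String × String)) (s : String) (m : String)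
    (h : ∃ p ∈ table, PySem.Str.isIn p.1 s = true) :
    findMonthD table s m = findMonth table s := by
  induction table with
  | nil => simp at h
  | cons a t ih =>
    obtain ⟨p, hp, hps⟩ := h
    obtain ⟨abbr, num⟩ := a
    simp only [findMonthD, findMonth]
    split_ifs with hc
    · rfl
    · apply ih
      rcases List.mem_cons.mp hp with rfl | hmem
      · exact absurd hps (by simpa using hc)
      · exact ⟨p, hmem, hps⟩

-- under Pre_, A's loop body is constant in the accumulator, equal to B's table scan
theorem body_eq_alt (s : String) (h : Pre_month_generator s) (m : String) :
    (if PySem.Str.isIn "Jan" s then "01"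
     else if PySem.Str.isIn "Feb" s then "02"
     else if PySem.Str.isIn "Mar" s then "03"
     else if PySem.Str.isIn "Apr" s then "04"
     else if PySem.Str.isIn "May" s then "05"
     else if PySem.Str.isIn "Jun" s then "06"
     else if PySem.Str.isIn "Jul" s then "07"
     else if PySem.Str.isIn "Aug" s then "08"
     else if PySem.Str.isIn "Sep" s then "09"
     else if PySem.Str.isIn "Oct" s then "10"
     else if PySem.Str.isIn "Nov" s then "11"
     else if PySem.Str.isIn "Dec" s then "12"
     else m) = month_generator_alt s := by
  have hchain : (if PySem.Str.isIn "Jan" s then "01"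
     else if PySem.Str.isIn "Feb" s then "02"
     else if PySem.Str.isIn "Mar" s then "03"
     else if PySem.Str.isIn "Apr" s then "04"
     else if PySem.Str.isIn "May" s then "05"
     else if PySem.Str.isIn "Jun" s then "06"
     else if PySem.Str.isIn "Jul" s then "07"
     else if PySem.Str.isIn "Aug" s then "08"
     else if PySem.Str.isIn "Sep" s then "09"
     else if PySem.Str.isIn "Oct" s then "10"
     else if PySem.Str.isIn "Nov" s then "11"
     else if PySem.Str.isIn "Dec" s then "12"
     else m) = findMonthD monthTable s m := by
    simp only [findMonthD, monthTable]
  rw [hchain, findMonthD_eq monthTable s m (pre_exists s h)]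
  rfl
-- ===== VERDICT (by name: the statement is the Claim_ definition above) =====
theorem month_generator_spec : Claim_equal_month_generator := by
  intro s _ hpre
  unfold Spec_month_generator month_generator
  have hb : (fun (month : String) (_ : Char) =>
      if PySem.Str.isIn "Jan" s then "01"
      else if PySem.Str.isIn "Feb" s then "02"
      else if PySem.Str.isIn "Mar" s then "03"
      else if PySem.Str.isIn "Apr" s then "04"
      else if PySem.Str.isIn "May" s then "05"
      else if PySem.Str.isIn "Jun" s then "06"
      else if PySem.Str.isIn "Jul" s then "07"
      else if PySem.Str.isIn "Aug" s then "08"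
      else if PySem.Str.isIn "Sep" s then "09"
      else if PySem.Str.isIn "Oct" s then "10"
      else if PySem.Str.isIn "Nov" s then "11"
      else if PySem.Str.isIn "Dec" s then "12"
      else month) = fun _ _ => month_generator_alt s := by
    funext m c; exact body_eq_alt s hpre m
  rw [hb, foldl_const_of_ne_nil _ _ _ (toList_ne_nil_of_pre s hpre)]
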